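-- pv_equiv track=rewrite | github.com/michaeliyke/alx-interview | 0x04-utf8_validation/main.py | validateUTF8
-- ===== SOURCE A (Python) =====
-- from typing import List
--
-- def validateUTF8(chars: List[int]) -> bool:
--     """UTF-8 Validator function"""
--     # (192-0XC0)(127-0X7F)(223-0XDF)(128-0X80)(191-0XBF)(247-0XF7)(240-0XF0)
--     # (224-0XE0)(-0XEF)
--     num_bytes = 0
--
--     for ch in chars:
--         if num_bytes == 0:
--             if (ch >> 5 == 0B110): num_bytes = 1
--             elif (ch >> 4 == 0B1110): num_bytes = 2
--             elif (ch >> 3 == 0B11110): num_bytes = 3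
--             elif (ch >> 7): return False
--         else:
--             if (ch >> 6 != 0B10): return False
--             # if (ch >> 6 > 0B10): return False
--             num_bytes -= 1
--
--     return num_bytes == 0
-- ===== SOURCE B (Python) =====
-- from typing import List
--
-- def validateUTF8(chars: List[int]) -> bool:
--     """UTF-8 Validator: recursive consume-a-character decomposition."""
--     if not chars:
--         return True
--     ch = chars[0]
--     if ch >> 7 == 0:
--         cont = 0
--     elif ch >> 5 == 0b110:
--         cont = 1
--     elif ch >> 4 == 0b1110:
--         cont = 2
--     elif ch >> 3 == 0b11110:
--         cont = 3
--     else: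
--         return False
--     tail = chars[1:cont + 1]
--     if len(tail) < cont or any(b >> 6 != 0b10 for b in tail):
--         return False
--     return validateUTF8(chars[cont + 1:])
-- ===== Notes on version B (the rewrite author's own statement) =====
-- stated objective: alternative
-- what changed: Replaces A's single-pass decrementing state-machine loop by a recursion that classifies a leading byte, checks its continuation bytes as a block, and recurses on the rest of the list.
import Mathlib
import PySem

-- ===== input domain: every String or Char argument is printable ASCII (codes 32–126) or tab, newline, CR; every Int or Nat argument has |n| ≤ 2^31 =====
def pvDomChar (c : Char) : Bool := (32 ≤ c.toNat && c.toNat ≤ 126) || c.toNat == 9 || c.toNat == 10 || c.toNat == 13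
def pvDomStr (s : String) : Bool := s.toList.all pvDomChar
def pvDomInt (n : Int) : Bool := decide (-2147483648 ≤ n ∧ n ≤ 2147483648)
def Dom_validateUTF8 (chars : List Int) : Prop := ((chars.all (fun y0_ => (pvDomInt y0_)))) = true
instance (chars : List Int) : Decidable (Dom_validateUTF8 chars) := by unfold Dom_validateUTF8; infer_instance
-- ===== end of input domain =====

-- B changes the decomposition only (recursive character-consume instead of A's decrementing
-- state counter); same cost, same return value.

-- ===== PORT A =====
-- A's for-loop over chars with the num_bytes counter, transliterated as structural recursion.
def validateUTF8Loop (chars : List Int) (num_bytes : Int) : Bool :=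
  match chars with
  | [] => num_bytes == 0
  | ch :: rest =>
    if num_bytes == 0 then
      if ch >>> (5 : Nat) == 6 then validateUTF8Loop rest 1
      else if ch >>> (4 : Nat) == 14 then validateUTF8Loop rest 2
      else if ch >>> (3 : Nat) == 30 then validateUTF8Loop rest 3
      else if ch >>> (7 : Nat) != 0 then false
      else validateUTF8Loop rest num_bytes
    else
      if ch >>> (6 : Nat) != 2 then false
      else validateUTF8Loop rest (num_bytes - 1)

def validateUTF8 (chars : List Int) : Bool := validateUTF8Loop chars 0

-- ===== PORT B =====
def validateUTF8_alt (chars : List Int) : Bool :=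
  match chars with
  | [] => true
  | ch :: rest =>
    let cont? : Option Nat :=
      if ch >>> (7 : Nat) == 0 then some 0
      else if ch >>> (5 : Nat) == 6 then some 1
      else if ch >>> (4 : Nat) == 14 then some 2
      else if ch >>> (3 : Nat) == 30 then some 3
      else none
    match cont? with
    | none => false
    | some cont =>
      let tail := rest.take cont
      if tail.length < cont || tail.any (fun b => b >>> (6 : Nat) != 2) then false
      else validateUTF8_alt (rest.drop cont)
termination_by chars.length
decreasing_by simp

-- ===== PRECONDITION & SPEC =====
def Spec_validateUTF8 (chars : List Int) (out : Bool) : Prop := out = validateUTF8_alt chars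
instance (chars : List Int) (out : Bool) : Decidable (Spec_validateUTF8 chars out) := by unfold Spec_validateUTF8; infer_instance

-- ===== CLAIM (what is proved, stated in full; the proofs are below) =====
def Claim_equal_validateUTF8 : Prop := ∀ (chars : List Int), Dom_validateUTF8 chars → Spec_validateUTF8 chars (validateUTF8 chars)

-- ===== LEMMAS AND PROOFS =====

-- Range characterisations of the shift tests.
lemma shr7_iff (c : Int) : (c >>> (7 : Nat) = 0) ↔ (0 ≤ c ∧ c < 128) := by
  rw [Int.shiftRight_eq_div_pow]; omega

lemma shr5_iff (c : Int) : (c >>> (5 : Nat) = 6) ↔ (192 ≤ c ∧ c < 224) := by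
  rw [Int.shiftRight_eq_div_pow]; omega

lemma shr4_iff (c : Int) : (c >>> (4 : Nat) = 14) ↔ (224 ≤ c ∧ c < 240) := by
  rw [Int.shiftRight_eq_div_pow]; omega

lemma shr3_iff (c : Int) : (c >>> (3 : Nat) = 30) ↔ (240 ≤ c ∧ c < 248) := by
  rw [Int.shiftRight_eq_div_pow]; omega

-- A's loop with a positive counter consumes one continuation byte.
lemma loop_succ (c : Int) (r : List Int) (k : Nat) :
    validateUTF8Loop (c :: r) ((k : Int) + 1) =
      if c >>> (6 : Nat) == 2 then validateUTF8Loop r k else false := by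
  have h : (((k : Int) + 1) == 0) = false := by
    simp only [beq_eq_false_iff_ne, ne_eq]; omega
  have h1 : ((k : Int) + 1 - 1) = (k : Int) := by omega
  simp only [validateUTF8Loop, h, Bool.false_eq_true, if_false, h1, bne]
  by_cases hc : (c >>> (6 : Nat) == 2) = true <;> simp [hc]

-- A's loop with counter k consumes k continuation bytes, then restarts at 0.
lemma loop_consume (k : Nat) (chars : List Int) :
    validateUTF8Loop chars (k : Int) =
      (decide (k ≤ chars.length) && (chars.take k).all (fun b => b >>> (6 : Nat) == 2)
        && validateUTF8Loop (chars.drop k) 0) := by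
  induction k generalizing chars with
  | zero => simp
  | succ k ih =>
    cases chars with
    | nil =>
      have h : (((k : Int) + 1) == 0) = false := by
        simp only [beq_eq_false_iff_ne, ne_eq]; omega
      simp only [validateUTF8Loop, Nat.cast_add, Nat.cast_one, h]
      simp
    | cons c r =>
      have h := loop_succ c r k
      rw [show ((k + 1 : Nat) : Int) = (k : Int) + 1 by push_cast; ring, h]
      by_cases hc : (c >>> (6 : Nat) == 2) = true
      · have hc' : c >>> (6 : Nat) = 2 := by simpa using hc
        simp only [hc, if_true, ih r, List.take_succ_cons, List.drop_succ_cons,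
          List.length_cons, List.all_cons]
        simp [Bool.and_comm, Bool.and_left_comm]
      · simp only [Bool.not_eq_true] at hc
        simp [hc]

-- B's block check, rewritten in the form loop_consume produces.
lemma check_eq (k : Nat) (r : List Int) (X : Bool) :
    (decide (k ≤ r.length) && (r.take k).all (fun b => b >>> (6 : Nat) == 2) && X) =
      (if (r.take k).length < k || (r.take k).any (fun b => b >>> (6 : Nat) != 2) then false
       else X) := by
  by_cases h : k ≤ r.length
  · have hl : (r.take k).length = k := by simp [List.length_take]; omega
    simp only [h, decide_true, Bool.true_and, hl, Nat.lt_irrefl, decide_false,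
      Bool.false_or]
    cases hall : (r.take k).all (fun b => b >>> (6 : Nat) == 2)
    · have : (r.take k).any (fun b => b >>> (6 : Nat) != 2) = true := by
        rw [List.any_eq_not_all_not]
        simp only [bne]
        simp [hall]
      simp [this]
    · have : (r.take k).any (fun b => b >>> (6 : Nat) != 2) = false := by
        rw [List.any_eq_not_all_not]
        simp only [bne]
        simp [hall]
      simp [this]
  · have hl : (r.take k).length < k := by simp [List.length_take]; omega
    simp [h]

-- The two ports agree, by strong induction on the length of the list.
lemma main_eq_aux (n : Nat) : ∀ chars : List Int, chars.length ≤ n →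
    validateUTF8Loop chars 0 = validateUTF8_alt chars := by
  induction n with
  | zero =>
    intro chars h
    have : chars = [] := by cases chars <;> simp_all
    subst this; simp [validateUTF8Loop, validateUTF8_alt]
  | succ n ih =>
    intro chars h
    cases chars with
    | nil => simp [validateUTF8Loop, validateUTF8_alt]
    | cons c r =>
      have hr : r.length ≤ n := by simp at h; omega
      -- unfold one step of each port
      rw [show validateUTF8Loop (c :: r) 0 =
          (if c >>> (5 : Nat) == 6 then validateUTF8Loop r 1
           else if c >>> (4 : Nat) == 14 then validateUTF8Loop r 2
           else if c >>> (3 : Nat) == 30 then validateUTF8Loop r 3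
           else if c >>> (7 : Nat) != 0 then false
           else validateUTF8Loop r 0) from by simp [validateUTF8Loop]]
      rw [validateUTF8_alt]
      by_cases h7 : c >>> (7 : Nat) = 0
      · have hb : 0 ≤ c ∧ c < 128 := (shr7_iff c).mp h7
        have h5 : (c >>> (5 : Nat) == 6) = false := by
          simp only [beq_eq_false_iff_ne, ne_eq, shr5_iff]; omega
        have h4 : (c >>> (4 : Nat) == 14) = false := by
          simp only [beq_eq_false_iff_ne, ne_eq, shr4_iff]; omega
        have h3 : (c >>> (3 : Nat) == 30) = false := by
          simp only [beq_eq_false_iff_ne, ne_eq, shr3_iff]; omega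
        simp only [h5, h4, h3, h7, Bool.false_eq_true, if_false, bne_self_eq_false,
          beq_self_eq_true, if_true]
        simpa using ih r hr
      · have h7' : (c >>> (7 : Nat) == 0) = false := by
          simp only [beq_eq_false_iff_ne, ne_eq]; exact h7
        simp only [h7', Bool.false_eq_true, if_false]
        by_cases h5 : (c >>> (5 : Nat) == 6) = true
        · simp only [h5, if_true]
          have hk := loop_consume 1 r
          push_cast at hk
          rw [hk, ih (r.drop 1) (le_trans (by simp) hr), check_eq 1 r]
        · simp only [h5, Bool.false_eq_true, if_false]
          by_cases h4 : (c >>> (4 : Nat) == 14) = true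
          · simp only [h4, if_true]
            have hk := loop_consume 2 r
            push_cast at hk
            rw [hk, ih (r.drop 2) (le_trans (by simp) hr), check_eq 2 r]
          · simp only [h4, Bool.false_eq_true, if_false]
            by_cases h3 : (c >>> (3 : Nat) == 30) = true
            · simp only [h3, if_true]
              have hk := loop_consume 3 r
              push_cast at hk
              rw [hk, ih (r.drop 3) (le_trans (by simp) hr), check_eq 3 r]
            · simp only [h3, Bool.false_eq_true, if_false, bne, h7', Bool.not_false,
                if_true]

lemma main_eq (chars : List Int) : validateUTF8Loop chars 0 = validateUTF8_alt chars :=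
  main_eq_aux chars.length chars le_rfl

-- ===== VERDICT (by name: the statement is the Claim_ definition above) =====
theorem validateUTF8_spec : Claim_equal_validateUTF8 := by
  intro chars _
  unfold Spec_validateUTF8 validateUTF8
  exact main_eq chars
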